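-- pv_equiv track=rewrite | github.com/Timmiethy/elfie-lab-analyzer | backend/app/services/row_assembler/v2.py | _deduplicate_adjacent_labels
-- ===== SOURCE A (Python) =====
-- from typing import Any
--
-- def _deduplicate_adjacent_labels(rows: list[dict[str, Any]]) -> list[dict[str, Any]]:
--     """Collapse duplicated adjacent label rows so analytes like SED RATE
--     and MAGNESIUM RBC do not repeat their label twice.
--
--     v12 wave-6: when two adjacent rows share the same normalized analyte
--     label and only one carries a value, merge them into a single row
--     with the value.  If both carry values, keep the cleaner one.
--     """
--     if len(rows) <= 1:
--         return rows
--
--     result: list[dict[str, Any]] = []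
--     i = 0
--     while i < len(rows):
--         current = rows[i]
--         current_label = (current.get("raw_analyte_label") or "").strip().lower()
--         if not current_label or i == len(rows) - 1:
--             result.append(current)
--             i += 1
--             continue
--
--         # Look at next row
--         next_row = rows[i + 1]
--         next_label = (next_row.get("raw_analyte_label") or "").strip().lower()
--
--         if current_label == next_label:
--             # Same analyte — deduplicate
--             current_has_value = current.get("raw_value_string") is not None
--             next_has_value = next_row.get("raw_value_string") is not None
--
--             if not current_has_value and next_has_value:
--                 # Next row has the value — keep it instead of current
--                 result.append(next_row)
--             elif current_has_value and not next_has_value: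
--                 # Current has the value — keep current
--                 result.append(current)
--             elif current_has_value and next_has_value:
--                 # Both have values — keep the one with cleaner text
--                 current_text = current.get("raw_text") or ""
--                 next_text = next_row.get("raw_text") or ""
--                 if len(next_text) > len(current_text):
--                     result.append(next_row)
--                 else:
--                     result.append(current)
--             else:
--                 # Neither has value — keep the first one
--                 result.append(current)
--             i += 2  # Skip both rows (we merged them)
--         else:
--             result.append(current)
--             i += 1
--
--     return result
-- ===== SOURCE B (Python) =====
-- def _deduplicate_adjacent_labels(rows: list) -> list:
--     """Two staged passes: split rows into maximal runs of equal nonempty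
--     normalized labels, then collapse each run pairwise."""
--     if len(rows) <= 1:
--         return rows
--
--     def norm(row):
--         return (row.get("raw_analyte_label") or "").strip().lower()
--
--     def pick(a, b):
--         a_has = a.get("raw_value_string") is not None
--         b_has = b.get("raw_value_string") is not None
--         if b_has and not a_has:
--             return b
--         if a_has and b_has and len(b.get("raw_text") or "") > len(a.get("raw_text") or ""):
--             return b
--         return a
--
--     # stage 1: maximal runs of one nonempty label (empty labels stay singletons)
--     runs = []
--     j = 0
--     n = len(rows)
--     while j < n:
--         lbl = norm(rows[j])
--         k = j + 1
--         while lbl and k < n and norm(rows[k]) == lbl: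
--             k += 1
--         runs.append(rows[j:k])
--         j = k
--
--     # stage 2: collapse each run two rows at a time
--     out = []
--     for run in runs:
--         while len(run) >= 2:
--             out.append(pick(run[0], run[1]))
--             run = run[2:]
--         if run:
--             out.append(run[0])
--     return out
-- ===== Notes on version B (the rewrite author's own statement) =====
-- stated objective: alternative
-- what changed: Replaces A's single lookahead while-loop (index jumping by 1 or 2, comparing rows[i] with rows[i+1]) by two staged passes: first split the rows into maximal runs of one repeated nonempty normalized label, then collapse each run two rows at a time with the same winner rule.
import Mathlib
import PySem

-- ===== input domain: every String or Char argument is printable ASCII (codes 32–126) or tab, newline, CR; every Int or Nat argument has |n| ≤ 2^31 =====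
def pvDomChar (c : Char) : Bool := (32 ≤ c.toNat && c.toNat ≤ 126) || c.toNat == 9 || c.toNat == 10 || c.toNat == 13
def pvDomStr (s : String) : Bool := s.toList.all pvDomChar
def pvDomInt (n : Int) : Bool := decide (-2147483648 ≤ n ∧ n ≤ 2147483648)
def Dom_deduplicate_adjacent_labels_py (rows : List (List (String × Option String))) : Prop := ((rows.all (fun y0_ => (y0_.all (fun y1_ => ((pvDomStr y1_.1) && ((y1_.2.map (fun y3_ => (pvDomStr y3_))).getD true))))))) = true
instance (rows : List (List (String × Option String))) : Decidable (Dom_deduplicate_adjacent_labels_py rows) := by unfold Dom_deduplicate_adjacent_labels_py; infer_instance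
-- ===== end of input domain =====

set_option maxHeartbeats 1000000


-- B replaces A's single while-loop with a lookahead index jumping by 1 or 2 by two staged
-- passes: first split the rows into maximal runs of one nonempty normalized label, then
-- collapse each run pairwise (objective: alternative decomposition, same cost).

-- ===== PORT A =====
-- shared row accessors (Python: (row.get(k) or "").strip().lower(), row.get(k) is not None, len(row.get("raw_text") or ""))
def pvRowGet (row : List (String × Option String)) (k : String) : Option (Option String) :=
  (PySem.Dict.mk row).get? k

-- (row.get("raw_analyte_label") or "").strip().lower()
def pvNormLabel (row : List (String × Option String)) : String :=
  PySem.Str.lower (PySem.Str.strip (match pvRowGet row "raw_analyte_label" with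
    | some (some s) => s
    | _ => ""))

-- row.get("raw_value_string") is not None
def pvHasValue (row : List (String × Option String)) : Bool :=
  match pvRowGet row "raw_value_string" with
  | some (some _) => true
  | _ => false

-- len(row.get("raw_text") or "")
def pvTextLen (row : List (String × Option String)) : Int :=
  PySem.Str.len (match pvRowGet row "raw_text" with
    | some (some s) => s
    | _ => "")

-- the while-loop of A, index i, accumulator result
def pvALoop (rows : List (List (String × Option String))) (i : Nat)
    (result : List (List (String × Option String))) : List (List (String × Option String)) :=
  if h : i < rows.length then
    let current := rows[i]
    let current_label := pvNormLabel current
    if current_label = "" ∨ i = rows.length - 1 then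
      pvALoop rows (i + 1) (result ++ [current])
    else
      let next_row := rows[i + 1]!
      let next_label := pvNormLabel next_row
      if current_label = next_label then
        if ¬ pvHasValue current ∧ pvHasValue next_row then
          pvALoop rows (i + 2) (result ++ [next_row])
        else if pvHasValue current ∧ ¬ pvHasValue next_row then
          pvALoop rows (i + 2) (result ++ [current])
        else if pvHasValue current ∧ pvHasValue next_row then
          if pvTextLen next_row > pvTextLen current then
            pvALoop rows (i + 2) (result ++ [next_row])
          else
            pvALoop rows (i + 2) (result ++ [current])
        else
          pvALoop rows (i + 2) (result ++ [current])
      else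
        pvALoop rows (i + 1) (result ++ [current])
  else result
termination_by rows.length - i

def deduplicate_adjacent_labels_py (rows : List (List (String × Option String))) : List (List (String × Option String)) :=
  if rows.length ≤ 1 then rows
  else pvALoop rows 0 []

-- ===== PORT B =====
-- pick(a, b) of Source B
def pvPick (a b : List (String × Option String)) : List (String × Option String) :=
  if pvHasValue b ∧ ¬ pvHasValue a then b
  else if pvHasValue a ∧ pvHasValue b ∧ pvTextLen b > pvTextLen a then b
  else a

-- Source B stage 1 inner while: extend the run while the next rows carry the same label lbl
def pvTakeRun (lbl : String) : List (List (String × Option String)) →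
    List (List (String × Option String)) × List (List (String × Option String))
  | [] => ([], [])
  | x :: xs =>
    if pvNormLabel x = lbl then
      (x :: (pvTakeRun lbl xs).1, (pvTakeRun lbl xs).2)
    else ([], x :: xs)

theorem pvTakeRun_rest_le (lbl : String) : ∀ (l : List (List (String × Option String))),
    (pvTakeRun lbl l).2.length ≤ l.length := by
  intro l
  induction l with
  | nil => simp [pvTakeRun]
  | cons x xs ih =>
    simp only [pvTakeRun]
    split
    · simpa using Nat.le_succ_of_le ih
    · simp

-- Source B stage 1 outer while: list of maximal runs (empty labels stay singletons)
def pvRuns : List (List (String × Option String)) → List (List (List (String × Option String)))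
  | [] => []
  | r :: rest =>
    if pvNormLabel r = "" then [r] :: pvRuns rest
    else (r :: (pvTakeRun (pvNormLabel r) rest).1) :: pvRuns (pvTakeRun (pvNormLabel r) rest).2
termination_by l => l.length
decreasing_by all_goals (have h := pvTakeRun_rest_le (pvNormLabel r) rest; have h2 : (r :: rest).length = rest.length + 1 := rfl; omega)

-- Source B stage 2 inner while: collapse one run two rows at a time into out
def pvEmit (out : List (List (String × Option String))) :
    List (List (String × Option String)) → List (List (String × Option String))
  | a :: b :: rest => pvEmit (out ++ [pvPick a b]) rest
  | [x] => out ++ [x]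
  | [] => out

def deduplicate_adjacent_labels_py_alt (rows : List (List (String × Option String))) : List (List (String × Option String)) :=
  if rows.length ≤ 1 then rows
  else (pvRuns rows).foldl pvEmit []

-- ===== PRECONDITION & SPEC =====
def Spec_deduplicate_adjacent_labels_py (rows : List (List (String × Option String))) (out : List (List (String × Option String))) : Prop := out = deduplicate_adjacent_labels_py_alt rows
instance (rows : List (List (String × Option String))) (out : List (List (String × Option String))) : Decidable (Spec_deduplicate_adjacent_labels_py rows out) := by unfold Spec_deduplicate_adjacent_labels_py; infer_instance

-- ===== CLAIM (what is proved, stated in full; the proofs are below) =====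
def Claim_equal_deduplicate_adjacent_labels_py : Prop := ∀ (rows : List (List (String × Option String))), Dom_deduplicate_adjacent_labels_py rows → Spec_deduplicate_adjacent_labels_py rows (deduplicate_adjacent_labels_py rows)

-- ===== LEMMAS AND PROOFS =====

-- functional reformulation of A's while-loop over the suffix of rows still to process
def pvA' : List (List (String × Option String)) → List (List (String × Option String))
  | [] => []
  | [x] => [x]
  | x :: y :: rest =>
    let lbl := pvNormLabel x
    if lbl = "" then x :: pvA' (y :: rest)
    else if lbl = pvNormLabel y then
      (if ¬ pvHasValue x ∧ pvHasValue y then y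
       else if pvHasValue x ∧ ¬ pvHasValue y then x
       else if pvHasValue x ∧ pvHasValue y then
         (if pvTextLen y > pvTextLen x then y else x)
       else x) :: pvA' rest
    else x :: pvA' (y :: rest)

theorem pvA'_nil : pvA' [] = [] := by rw [pvA']

theorem pvA'_single (x : List (String × Option String)) : pvA' [x] = [x] := by rw [pvA']

theorem pvA'_cons2 (x y : List (String × Option String)) (rest : List (List (String × Option String))) :
    pvA' (x :: y :: rest) =
    (if pvNormLabel x = "" then x :: pvA' (y :: rest)
    else if pvNormLabel x = pvNormLabel y then
      (if ¬ pvHasValue x ∧ pvHasValue y then y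
       else if pvHasValue x ∧ ¬ pvHasValue y then x
       else if pvHasValue x ∧ pvHasValue y then
         (if pvTextLen y > pvTextLen x then y else x)
       else x) :: pvA' rest
    else x :: pvA' (y :: rest)) := by rw [pvA']

-- A's four-way merge branch computes exactly pvPick
theorem pvMerge_eq_pick (h r : List (String × Option String)) :
    (if ¬ pvHasValue h ∧ pvHasValue r then r
     else if pvHasValue h ∧ ¬ pvHasValue r then h
     else if pvHasValue h ∧ pvHasValue r then
       (if pvTextLen r > pvTextLen h then r else h)
     else h) = pvPick h r := by
  cases hv1 : pvHasValue h <;> cases hv2 : pvHasValue r <;>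
    simp [pvPick, hv1, hv2]

-- simple pairwise collapse of one run
def pvPairs : List (List (String × Option String)) → List (List (String × Option String))
  | a :: b :: rest => pvPick a b :: pvPairs rest
  | [x] => [x]
  | [] => []

theorem pvEmit_eq (run : List (List (String × Option String))) :
    ∀ out, pvEmit out run = out ++ pvPairs run := by
  induction run using pvPairs.induct with
  | case1 a b rest ih => intro out; simp [pvEmit, pvPairs, ih]
  | case2 x => intro out; simp [pvEmit, pvPairs]
  | case3 => intro out; simp [pvEmit, pvPairs]

theorem foldl_pvEmit (runs : List (List (List (String × Option String)))) :
    ∀ acc, runs.foldl pvEmit acc = acc ++ runs.flatMap pvPairs := by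
  induction runs with
  | nil => intro acc; simp
  | cons r rs ih => intro acc; simp [List.foldl_cons, ih, pvEmit_eq]

-- A's while-loop equals pvA' on the suffix rows.drop i
theorem pvALoop_eq_drop (n : Nat) : ∀ (rows : List (List (String × Option String))) (i : Nat)
    (result : List (List (String × Option String))), rows.length - i ≤ n →
    pvALoop rows i result = result ++ pvA' (rows.drop i) := by
  induction n with
  | zero =>
    intro rows i result hn
    have hi : ¬ i < rows.length := by omega
    rw [pvALoop]
    simp only [dif_neg hi]
    rw [List.drop_eq_nil_of_le (by omega), pvA'_nil, List.append_nil]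
  | succ n ih =>
    intro rows i result hn
    by_cases hi : i < rows.length
    · have hgeti : rows.drop i = rows[i] :: rows.drop (i + 1) :=
        List.drop_eq_getElem_cons hi
      rw [pvALoop]
      simp only [dif_pos hi]
      by_cases hlast : i = rows.length - 1
      · -- last element
        have hdrop1 : rows.drop (i + 1) = [] := List.drop_eq_nil_of_le (by omega)
        rw [if_pos (Or.inr hlast)]
        rw [ih rows (i+1) _ (by omega), hdrop1, hgeti, hdrop1, pvA'_nil, pvA'_single]
        simp
      · have hi1 : i + 1 < rows.length := by omega
        have hgeti1 : rows.drop (i+1) = rows[i+1] :: rows.drop (i + 2) :=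
          List.drop_eq_getElem_cons hi1
        have hbang : rows[i+1]! = rows[i+1] := getElem!_pos rows (i+1) hi1
        rw [hbang]
        by_cases hlab : pvNormLabel rows[i] = ""
        · rw [if_pos (Or.inl hlab)]
          rw [ih rows (i+1) _ (by omega), hgeti, hgeti1, pvA'_cons2, if_pos hlab, ← hgeti1]
          simp
        · rw [if_neg (show ¬ (pvNormLabel rows[i] = "" ∨ i = rows.length - 1) from fun hc => hc.elim hlab hlast)]
          by_cases heq : pvNormLabel rows[i] = pvNormLabel rows[i+1]
          · rw [if_pos heq]
            have goal2 : ∀ br, br = (if ¬ pvHasValue rows[i] ∧ pvHasValue rows[i+1] then rows[i+1]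
                 else if pvHasValue rows[i] ∧ ¬ pvHasValue rows[i+1] then rows[i]
                 else if pvHasValue rows[i] ∧ pvHasValue rows[i+1] then
                   (if pvTextLen rows[i+1] > pvTextLen rows[i] then rows[i+1] else rows[i])
                 else rows[i]) →
                pvALoop rows (i+2) (result ++ [br]) = result ++ pvA' (rows.drop i) := by
              intro br hbr
              rw [ih rows (i+2) _ (by omega), hgeti, hgeti1, pvA'_cons2, if_neg hlab,
                  if_pos heq, ← hbr]
              simp
            by_cases c1 : ¬ pvHasValue rows[i] ∧ pvHasValue rows[i+1]
            · rw [if_pos c1]; exact goal2 _ (by rw [if_pos c1])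
            · rw [if_neg c1]
              by_cases c2 : pvHasValue rows[i] ∧ ¬ pvHasValue rows[i+1]
              · rw [if_pos c2]; exact goal2 _ (by rw [if_neg c1, if_pos c2])
              · rw [if_neg c2]
                by_cases c3 : pvHasValue rows[i] ∧ pvHasValue rows[i+1]
                · rw [if_pos c3]
                  by_cases c4 : pvTextLen rows[i+1] > pvTextLen rows[i]
                  · rw [if_pos c4]; exact goal2 _ (by rw [if_neg c1, if_neg c2, if_pos c3, if_pos c4])
                  · rw [if_neg c4]; exact goal2 _ (by rw [if_neg c1, if_neg c2, if_pos c3, if_neg c4])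
                · rw [if_neg c3]; exact goal2 _ (by rw [if_neg c1, if_neg c2, if_neg c3])
          · rw [if_neg heq]
            rw [ih rows (i+1) _ (by omega), hgeti, hgeti1, pvA'_cons2, if_neg hlab,
                if_neg heq, ← hgeti1]
            simp
    · rw [pvALoop]
      simp only [dif_neg hi]
      rw [List.drop_eq_nil_of_le (by omega), pvA'_nil, List.append_nil]

-- pvTakeRun splits its input: l = run ++ rest, every run member has label lbl,
-- and rest does not start with label lbl
theorem pvTakeRun_spec (lbl : String) : ∀ (l : List (List (String × Option String))),
    l = (pvTakeRun lbl l).1 ++ (pvTakeRun lbl l).2 ∧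
    (∀ y ∈ (pvTakeRun lbl l).1, pvNormLabel y = lbl) ∧
    (∀ z zs, (pvTakeRun lbl l).2 = z :: zs → pvNormLabel z ≠ lbl) := by
  intro l
  induction l with
  | nil => simp [pvTakeRun]
  | cons x xs ih =>
    obtain ⟨h1, h2, h3⟩ := ih
    by_cases hx : pvNormLabel x = lbl
    · have he : pvTakeRun lbl (x :: xs) = (x :: (pvTakeRun lbl xs).1, (pvTakeRun lbl xs).2) := by
        rw [pvTakeRun, if_pos hx]
      rw [he]
      refine ⟨?_, ?_, ?_⟩
      · exact congrArg (List.cons x) h1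
      · intro y hy
        rcases List.mem_cons.mp hy with h | h
        · subst h; exact hx
        · exact h2 y h
      · exact h3
    · have he : pvTakeRun lbl (x :: xs) = ([], x :: xs) := by
        rw [pvTakeRun, if_neg hx]
      rw [he]
      refine ⟨by simp, by simp, ?_⟩
      intro z zs hz
      have hz' : x :: xs = z :: zs := hz
      rw [List.cons.injEq] at hz'
      exact hz'.1 ▸ hx

-- within a run of rows sharing one nonempty label (followed by a suffix not starting
-- with that label), pvA' merges pairwise
theorem pvA'_run (n : Nat) : ∀ (run : List (List (String × Option String)))
    (x : List (String × Option String)) (rest : List (List (String × Option String))),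
    run.length ≤ n →
    pvNormLabel x ≠ "" → (∀ y ∈ run, pvNormLabel y = pvNormLabel x) →
    (∀ z zs, rest = z :: zs → pvNormLabel z ≠ pvNormLabel x) →
    pvA' (x :: run ++ rest) = pvPairs (x :: run) ++ pvA' rest := by
  induction n with
  | zero =>
    intro run x rest hn hx _ hrest
    have hruneq : run = [] := List.length_eq_zero_iff.mp (by omega)
    subst hruneq
    match rest with
    | [] => simp [pvA'_single, pvPairs, pvA'_nil]
    | z :: zs =>
      simp only [List.nil_append, List.cons_append]
      rw [pvA'_cons2, if_neg hx, if_neg (fun hc => hrest z zs rfl hc.symm)]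
      simp [pvPairs]
  | succ n ih =>
    intro run x rest hn hx hrun hrest
    match run with
    | [] =>
      match rest with
      | [] => simp [pvA'_single, pvPairs, pvA'_nil]
      | z :: zs =>
        simp only [List.nil_append, List.cons_append]
        rw [pvA'_cons2, if_neg hx, if_neg (fun hc => hrest z zs rfl hc.symm)]
        simp [pvPairs]
    | y :: run2 =>
      have hy : pvNormLabel y = pvNormLabel x := hrun y (by simp)
      rw [show (x :: (y :: run2) ++ rest) = x :: y :: (run2 ++ rest) by simp]
      rw [pvA'_cons2, if_neg hx, if_pos hy.symm, pvMerge_eq_pick]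
      rw [show pvPairs (x :: y :: run2) = pvPick x y :: pvPairs run2 from rfl]
      simp only [List.cons_append]
      congr 1
      match run2 with
      | [] =>
        simp only [pvPairs, List.nil_append]
      | z :: run3 =>
        have hz : pvNormLabel z ≠ "" := by
          rw [hrun z (by simp)]; exact hx
        have := ih run3 z rest (by simp at hn; omega)
          hz
          (fun w hw => by rw [hrun w (by simp [hw]), hrun z (by simp)])
          (fun w ws hw hc => hrest w ws hw (by rwa [hrun z (by simp)] at hc))
        simpa using this

-- pvA' equals the staged runs-then-pairs pipeline
theorem pvA'_eq_runs (n : Nat) : ∀ (l : List (List (String × Option String))),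
    l.length ≤ n → pvA' l = (pvRuns l).flatMap pvPairs := by
  induction n with
  | zero =>
    intro l hn
    have : l = [] := List.length_eq_zero_iff.mp (by omega)
    subst this; simp [pvA'_nil, pvRuns]
  | succ n ih =>
    intro l hn
    match l with
    | [] => simp [pvA'_nil, pvRuns]
    | r :: rest =>
      by_cases hlbl : pvNormLabel r = ""
      · rw [show pvRuns (r :: rest) = [r] :: pvRuns rest by rw [pvRuns]; simp [hlbl]]
        have hstep : pvA' (r :: rest) = r :: pvA' rest := by
          match rest with
          | [] => simp [pvA'_single, pvA'_nil]
          | z :: zs => rw [pvA'_cons2, if_pos hlbl]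
        rw [hstep, ih rest (by simpa using hn)]
        simp [pvPairs]
      · obtain ⟨hsplit, hmem, hnot⟩ := pvTakeRun_spec (pvNormLabel r) rest
        rw [show pvRuns (r :: rest) = (r :: (pvTakeRun (pvNormLabel r) rest).1) ::
            pvRuns (pvTakeRun (pvNormLabel r) rest).2 by rw [pvRuns]; simp [hlbl]]
        conv_lhs => rw [show (r :: rest) = (r :: (pvTakeRun (pvNormLabel r) rest).1) ++
            (pvTakeRun (pvNormLabel r) rest).2 from by
              rw [List.cons_append]; exact congrArg (List.cons r) hsplit]
        rw [pvA'_run ((pvTakeRun (pvNormLabel r) rest).1.length) _ r _ le_rfl hlbl hmem hnot]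
        rw [ih ((pvTakeRun (pvNormLabel r) rest).2)
          (by have h1 := pvTakeRun_rest_le (pvNormLabel r) rest; simp at hn ⊢; omega)]
        simp

-- ===== VERDICT (by name: the statement is the Claim_ definition above) =====
theorem deduplicate_adjacent_labels_py_spec : Claim_equal_deduplicate_adjacent_labels_py := by
  intro rows _
  unfold Spec_deduplicate_adjacent_labels_py deduplicate_adjacent_labels_py deduplicate_adjacent_labels_py_alt
  by_cases hlen : rows.length ≤ 1
  · simp [hlen]
  · simp only [hlen, if_false]
    rw [pvALoop_eq_drop rows.length rows 0 [] (by omega)]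
    simp only [List.drop_zero, List.nil_append]
    rw [pvA'_eq_runs rows.length rows le_rfl, foldl_pvEmit]
    simp
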